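-- pv_equiv track=rewrite | github.com/Josfemova/ngonzales_jmorales_smoya_digital_design_lab_2023 | laboratorio_4/neo_impl/matrices.py | wu
-- ===== SOURCE A (Python) =====
-- def wu(m):
--     mabajo = [[0,0,0,0], [0,0,0,0],[0,0,0,0],[0,0,0,0]] # solo la inicia
--     mderecha = [[0,0,0,0], [0,0,0,0],[0,0,0,0],[0,0,0,0]] # solo la inicia
--     marriba = [[0,0,0,0], [0,0,0,0],[0,0,0,0],[0,0,0,0]] # solo la inicia
--     mrara = [[0,0,0,0], [0,0,0,0],[0,0,0,0],[0,0,0,0]] # solo la inicia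
--     for i in range(0,4):
--         for j in range(0,4):
--             mabajo[i][j] = m[j][i]
--             mderecha[i][j] = m[i][3-j]
--             marriba[3-j][i] = m[i][j]
--             mrara[j][3-i] = m[i][j]
--     return [mabajo, mderecha, marriba, mrara];
-- ===== SOURCE B (Python) =====
-- def _rot(x):
--     # one quarter turn clockwise: rot(x)[r][c] == x[len(x)-1-c][r]
--     return [list(col) for col in zip(*x[::-1])]
--
-- def wu(m):
--     # Everything is derived by iterating a single clockwise quarter-turn primitive.
--     m4 = [[m[r][c] for c in range(4)] for r in range(4)]
--     mrara = _rot(m4)              # CW rotation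
--     marriba = _rot(_rot(mrara))   # CW^3 = CCW rotation
--     mabajo = _rot(m4[::-1])       # rot of the vertical flip = transpose
--     mderecha = _rot(mabajo)       # rot of the transpose = horizontal mirror
--     return [mabajo, mderecha, marriba, mrara]
-- ===== Notes on version B (the rewrite author's own statement) =====
-- stated objective: alternative
-- what changed: Replaces A's single fused double loop mutating four preallocated matrices by iterating one clockwise quarter-turn primitive (zip of the reversed rows): mrara = rot(m), marriba = rot^3(m), mabajo = rot(m reversed) (= transpose), mderecha = rot(transpose) (= row mirror).
import Mathlib
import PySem

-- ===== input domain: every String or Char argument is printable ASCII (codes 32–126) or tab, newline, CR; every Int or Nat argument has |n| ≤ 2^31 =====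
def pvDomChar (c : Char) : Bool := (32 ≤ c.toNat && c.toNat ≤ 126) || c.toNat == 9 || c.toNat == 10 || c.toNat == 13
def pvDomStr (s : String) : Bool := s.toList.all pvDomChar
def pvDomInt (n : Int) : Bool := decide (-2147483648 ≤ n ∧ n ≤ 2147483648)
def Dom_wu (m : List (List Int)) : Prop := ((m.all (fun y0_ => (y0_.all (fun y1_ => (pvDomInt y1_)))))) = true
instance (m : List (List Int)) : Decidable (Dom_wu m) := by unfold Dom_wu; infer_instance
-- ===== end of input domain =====

-- B replaces A's fused mutating double loop by iterating one clockwise quarter-turn primitive; same return value wherever A returns.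

-- ===== PORT A =====
-- in-place assignment mm[i][j] = v on a list-of-lists
def pvSet2 (mm : List (List Int)) (i j : Nat) (v : Int) : List (List Int) :=
  mm.set i ((mm.getD i []).set j v)

-- m[i][j]; total via default 0 (Pre_wu guarantees every access is in range, as in Python)
def pvGet2 (m : List (List Int)) (i j : Int) : Int :=
  PySem.List.pyGetD (PySem.List.pyGetD m i []) j 0

def wu (m : List (List Int)) : List (List (List Int)) :=
  let z : List (List Int) := [[0,0,0,0],[0,0,0,0],[0,0,0,0],[0,0,0,0]]
  let st :=
    (PySem.List.pyRange 0 4 1).foldl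
      (fun (s : List (List Int) × List (List Int) × List (List Int) × List (List Int)) i =>
        (PySem.List.pyRange 0 4 1).foldl
          (fun s j =>
            let mabajo := pvSet2 s.1 i.toNat j.toNat (pvGet2 m j i)
            let mderecha := pvSet2 s.2.1 i.toNat j.toNat (pvGet2 m i (3 - j))
            let marriba := pvSet2 s.2.2.1 (3 - j).toNat i.toNat (pvGet2 m i j)
            let mrara := pvSet2 s.2.2.2 j.toNat (3 - i).toNat (pvGet2 m i j)
            (mabajo, mderecha, marriba, mrara)) s)
      (z, z, z, z)
  [st.1, st.2.1, st.2.2.1, st.2.2.2]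

-- ===== PORT B =====
-- zip(*rows): columns of the rows, truncating at the shortest row (exact zip semantics),
-- structural recursion on the first row
def pvZipStarGo : List Int → List (List Int) → List (List Int)
  | [], _ => []
  | a :: as, rest =>
    if rest.any List.isEmpty then []
    else (a :: rest.map (fun r => r.headD 0)) :: pvZipStarGo as (rest.map List.tail)

def pvZipStar : List (List Int) → List (List Int)
  | [] => []
  | r :: rest => pvZipStarGo r rest

-- _rot(x) = [list(col) for col in zip(*x[::-1])]  (quarter turn clockwise)
def pvRot (x : List (List Int)) : List (List Int) := pvZipStar x.reverse

def wu_alt (m : List (List Int)) : List (List (List Int)) :=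
  -- [[m[r][c] for c in range(4)] for r in range(4)]; pyGetD's default is unreachable under Pre_wu
  let m4 := (PySem.List.pyRange 0 4 1).map (fun r =>
    (PySem.List.pyRange 0 4 1).map (fun c => PySem.List.pyGetD (PySem.List.pyGetD m r []) c 0))
  let mrara := pvRot m4               -- CW rotation
  let marriba := pvRot (pvRot mrara)  -- CW^3 = CCW rotation
  let mabajo := pvRot m4.reverse      -- rot of vertical flip = transpose
  let mderecha := pvRot mabajo        -- rot of transpose = horizontal mirror
  [mabajo, mderecha, marriba, mrara]

-- ===== PRECONDITION & SPEC =====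
-- Pre_wu: exactly the inputs on which A returns normally (A indexes m[0..3][0..3]; on anything smaller Python raises IndexError).
def Pre_wu (m : List (List Int)) : Prop :=
  4 ≤ m.length ∧ ∀ r ∈ m.take 4, 4 ≤ r.length
instance (m : List (List Int)) : Decidable (Pre_wu m) := by unfold Pre_wu; infer_instance

def pvWitness_wu : List (List Int) :=
  [[1,2,3,4],[5,6,7,8],[9,10,11,12],[13,14,15,16]]

def Spec_wu (m : List (List Int)) (out : List (List (List Int))) : Prop := out = wu_alt m
instance (m : List (List Int)) (out : List (List (List Int))) : Decidable (Spec_wu m out) := by unfold Spec_wu; infer_instance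

-- ===== CLAIM (what is proved, stated in full; the proofs are below) =====
def Claim_equal_wu : Prop := ∀ (m : List (List Int)), Dom_wu m → Pre_wu m → Spec_wu m (wu m)

-- ===== LEMMAS AND PROOFS =====
theorem len4_shape (r : List Int) (h : 4 ≤ r.length) :
    ∃ a b c d t, r = a :: b :: c :: d :: t := by
  match r, h with
  | a :: b :: c :: d :: t, _ => exact ⟨a, b, c, d, t, rfl⟩

-- ===== VERDICT (by name: the statement is the Claim_ definition above) =====
set_option maxHeartbeats 4000000 in
theorem wu_spec : Claim_equal_wu := by
  intro m _ hpre
  obtain ⟨hlen, hrows⟩ := hpre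
  match m, hlen with
  | r0 :: r1 :: r2 :: r3 :: rest, _ =>
    obtain ⟨a0, b0, c0, d0, t0, h0⟩ := len4_shape r0 (hrows r0 (by simp))
    obtain ⟨a1, b1, c1, d1, t1, h1⟩ := len4_shape r1 (hrows r1 (by simp))
    obtain ⟨a2, b2, c2, d2, t2, h2⟩ := len4_shape r2 (hrows r2 (by simp))
    obtain ⟨a3, b3, c3, d3, t3, h3⟩ := len4_shape r3 (hrows r3 (by simp))
    subst h0 h1 h2 h3
    have hr : PySem.List.pyRange 0 4 1 = [0,1,2,3] := by decide
    have hs0 : ((3:Int) - 0) = 3 := by decide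
    have hs1 : ((3:Int) - 1) = 2 := by decide
    have hs2 : ((3:Int) - 2) = 1 := by decide
    have hs3 : ((3:Int) - 3) = 0 := by decide
    have hp00 : PySem.List.pyGetD (PySem.List.pyGetD ((a0 :: b0 :: c0 :: d0 :: t0) :: (a1 :: b1 :: c1 :: d1 :: t1) :: (a2 :: b2 :: c2 :: d2 :: t2) :: (a3 :: b3 :: c3 :: d3 :: t3) :: rest) 0 []) 0 0 = a0 := by simp only [PySem.List.pyGetD_ofNat']; rfl
    have hp01 : PySem.List.pyGetD (PySem.List.pyGetD ((a0 :: b0 :: c0 :: d0 :: t0) :: (a1 :: b1 :: c1 :: d1 :: t1) :: (a2 :: b2 :: c2 :: d2 :: t2) :: (a3 :: b3 :: c3 :: d3 :: t3) :: rest) 0 []) 1 0 = b0 := by simp only [PySem.List.pyGetD_ofNat']; rfl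
    have hp02 : PySem.List.pyGetD (PySem.List.pyGetD ((a0 :: b0 :: c0 :: d0 :: t0) :: (a1 :: b1 :: c1 :: d1 :: t1) :: (a2 :: b2 :: c2 :: d2 :: t2) :: (a3 :: b3 :: c3 :: d3 :: t3) :: rest) 0 []) 2 0 = c0 := by simp only [PySem.List.pyGetD_ofNat']; rfl
    have hp03 : PySem.List.pyGetD (PySem.List.pyGetD ((a0 :: b0 :: c0 :: d0 :: t0) :: (a1 :: b1 :: c1 :: d1 :: t1) :: (a2 :: b2 :: c2 :: d2 :: t2) :: (a3 :: b3 :: c3 :: d3 :: t3) :: rest) 0 []) 3 0 = d0 := by simp only [PySem.List.pyGetD_ofNat']; rfl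
    have hp10 : PySem.List.pyGetD (PySem.List.pyGetD ((a0 :: b0 :: c0 :: d0 :: t0) :: (a1 :: b1 :: c1 :: d1 :: t1) :: (a2 :: b2 :: c2 :: d2 :: t2) :: (a3 :: b3 :: c3 :: d3 :: t3) :: rest) 1 []) 0 0 = a1 := by simp only [PySem.List.pyGetD_ofNat']; rfl
    have hp11 : PySem.List.pyGetD (PySem.List.pyGetD ((a0 :: b0 :: c0 :: d0 :: t0) :: (a1 :: b1 :: c1 :: d1 :: t1) :: (a2 :: b2 :: c2 :: d2 :: t2) :: (a3 :: b3 :: c3 :: d3 :: t3) :: rest) 1 []) 1 0 = b1 := by simp only [PySem.List.pyGetD_ofNat']; rfl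
    have hp12 : PySem.List.pyGetD (PySem.List.pyGetD ((a0 :: b0 :: c0 :: d0 :: t0) :: (a1 :: b1 :: c1 :: d1 :: t1) :: (a2 :: b2 :: c2 :: d2 :: t2) :: (a3 :: b3 :: c3 :: d3 :: t3) :: rest) 1 []) 2 0 = c1 := by simp only [PySem.List.pyGetD_ofNat']; rfl
    have hp13 : PySem.List.pyGetD (PySem.List.pyGetD ((a0 :: b0 :: c0 :: d0 :: t0) :: (a1 :: b1 :: c1 :: d1 :: t1) :: (a2 :: b2 :: c2 :: d2 :: t2) :: (a3 :: b3 :: c3 :: d3 :: t3) :: rest) 1 []) 3 0 = d1 := by simp only [PySem.List.pyGetD_ofNat']; rfl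
    have hp20 : PySem.List.pyGetD (PySem.List.pyGetD ((a0 :: b0 :: c0 :: d0 :: t0) :: (a1 :: b1 :: c1 :: d1 :: t1) :: (a2 :: b2 :: c2 :: d2 :: t2) :: (a3 :: b3 :: c3 :: d3 :: t3) :: rest) 2 []) 0 0 = a2 := by simp only [PySem.List.pyGetD_ofNat']; rfl
    have hp21 : PySem.List.pyGetD (PySem.List.pyGetD ((a0 :: b0 :: c0 :: d0 :: t0) :: (a1 :: b1 :: c1 :: d1 :: t1) :: (a2 :: b2 :: c2 :: d2 :: t2) :: (a3 :: b3 :: c3 :: d3 :: t3) :: rest) 2 []) 1 0 = b2 := by simp only [PySem.List.pyGetD_ofNat']; rfl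
    have hp22 : PySem.List.pyGetD (PySem.List.pyGetD ((a0 :: b0 :: c0 :: d0 :: t0) :: (a1 :: b1 :: c1 :: d1 :: t1) :: (a2 :: b2 :: c2 :: d2 :: t2) :: (a3 :: b3 :: c3 :: d3 :: t3) :: rest) 2 []) 2 0 = c2 := by simp only [PySem.List.pyGetD_ofNat']; rfl
    have hp23 : PySem.List.pyGetD (PySem.List.pyGetD ((a0 :: b0 :: c0 :: d0 :: t0) :: (a1 :: b1 :: c1 :: d1 :: t1) :: (a2 :: b2 :: c2 :: d2 :: t2) :: (a3 :: b3 :: c3 :: d3 :: t3) :: rest) 2 []) 3 0 = d2 := by simp only [PySem.List.pyGetD_ofNat']; rfl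
    have hp30 : PySem.List.pyGetD (PySem.List.pyGetD ((a0 :: b0 :: c0 :: d0 :: t0) :: (a1 :: b1 :: c1 :: d1 :: t1) :: (a2 :: b2 :: c2 :: d2 :: t2) :: (a3 :: b3 :: c3 :: d3 :: t3) :: rest) 3 []) 0 0 = a3 := by simp only [PySem.List.pyGetD_ofNat']; rfl
    have hp31 : PySem.List.pyGetD (PySem.List.pyGetD ((a0 :: b0 :: c0 :: d0 :: t0) :: (a1 :: b1 :: c1 :: d1 :: t1) :: (a2 :: b2 :: c2 :: d2 :: t2) :: (a3 :: b3 :: c3 :: d3 :: t3) :: rest) 3 []) 1 0 = b3 := by simp only [PySem.List.pyGetD_ofNat']; rfl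
    have hp32 : PySem.List.pyGetD (PySem.List.pyGetD ((a0 :: b0 :: c0 :: d0 :: t0) :: (a1 :: b1 :: c1 :: d1 :: t1) :: (a2 :: b2 :: c2 :: d2 :: t2) :: (a3 :: b3 :: c3 :: d3 :: t3) :: rest) 3 []) 2 0 = c3 := by simp only [PySem.List.pyGetD_ofNat']; rfl
    have hp33 : PySem.List.pyGetD (PySem.List.pyGetD ((a0 :: b0 :: c0 :: d0 :: t0) :: (a1 :: b1 :: c1 :: d1 :: t1) :: (a2 :: b2 :: c2 :: d2 :: t2) :: (a3 :: b3 :: c3 :: d3 :: t3) :: rest) 3 []) 3 0 = d3 := by simp only [PySem.List.pyGetD_ofNat']; rfl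
    simp only [Spec_wu, wu, wu_alt, pvGet2, hr, List.foldl, List.map, hs0, hs1, hs2, hs3, hp00, hp01, hp02, hp03, hp10, hp11, hp12, hp13, hp20, hp21, hp22, hp23, hp30, hp31, hp32, hp33]
    rfl
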